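-- pv_equiv track=rewrite | github.com/Pavel-Petkov03/SoftuniHomeworks | 03. Programming Advanced with Python/Основни задачи/tkinter_project/tk_logic.py | finding_error
-- ===== SOURCE A (Python) =====
-- from itertools import combinations
--
-- def division_error(our_user_input):
-- 	for index in range(len(our_user_input)-1):
-- 		if our_user_input[index] == '/' and our_user_input[index+1] == '0':
-- 			return True
-- 	return False
--
-- def finding_error(our_user_input):
-- 	template = ['+', '-', '*','/']
-- 	if our_user_input:
-- 		if our_user_input[-1] in template or our_user_input[0] in template or division_error(our_user_input):
-- 			return True
-- 		for error in set(combinations(['+', '-', '*','/','+', '-', '*','/'], 2)):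
-- 			if ''.join(error) in our_user_input:
-- 				return True
-- 		return False
-- ===== SOURCE B (Python) =====
-- def finding_error(our_user_input):
--     if not our_user_input:
--         return None
--     ops = set('+-*/')
--     if our_user_input[0] in ops or our_user_input[-1] in ops:
--         return True
--     for a, b in zip(our_user_input, our_user_input[1:]):
--         if (a in ops and b in ops) or (a == '/' and b == '0'):
--             return True
--     return False
-- ===== Notes on version B (the rewrite author's own statement) =====
-- stated objective: simpler
-- what changed: Replaced the combinations-of-operators set with repeated substring scans plus a separate division-error pass by a single adjacent-pair scan over zip(s, s[1:]) that flags two consecutive operators or a slash followed by a zero in one pass.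
import Mathlib
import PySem

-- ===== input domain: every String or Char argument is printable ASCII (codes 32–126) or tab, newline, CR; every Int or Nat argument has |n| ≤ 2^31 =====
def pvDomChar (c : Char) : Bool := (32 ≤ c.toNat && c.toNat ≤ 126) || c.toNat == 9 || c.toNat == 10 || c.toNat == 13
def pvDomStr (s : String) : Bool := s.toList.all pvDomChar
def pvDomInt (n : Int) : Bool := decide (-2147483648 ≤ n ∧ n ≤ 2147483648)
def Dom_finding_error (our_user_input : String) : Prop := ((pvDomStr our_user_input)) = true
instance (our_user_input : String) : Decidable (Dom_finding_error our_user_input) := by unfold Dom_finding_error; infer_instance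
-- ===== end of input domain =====

-- B replaces A's 16-substring-set scan plus separate division pass by one adjacent-pair scan (simpler, one pass).

-- ===== PORT A =====
def division_error (our_user_input : String) : Bool :=
  (PySem.List.pyRange 0 (PySem.Str.len our_user_input - 1)).any fun index =>
    (PySem.Str.pyGet? our_user_input index == some '/') &&
    (PySem.Str.pyGet? our_user_input (index + 1) == some '0')

def finding_error (our_user_input : String) : Option Bool :=
  let template : List Char := ['+', '-', '*', '/']
  if our_user_input.toList ≠ [] then
    if ((PySem.Str.pyGet? our_user_input (-1)).elim false template.contains
        || (PySem.Str.pyGet? our_user_input 0).elim false template.contains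
        || division_error our_user_input) then some true
    else if ((PySem.Set.ofList
          (PySem.List.combinations ['+', '-', '*', '/', '+', '-', '*', '/'] 2)).any
            fun error => PySem.Chars.isIn error our_user_input.toList) then some true
    else some false
  else none

-- ===== PORT B =====
def finding_error_alt (our_user_input : String) : Option Bool :=
  let cs := our_user_input.toList
  if cs.isEmpty then none
  else
    let ops : PySem.Set Char := PySem.Set.ofList ['+', '-', '*', '/']
    if cs.head?.elim false (PySem.Set.contains ops)
        || cs.getLast?.elim false (PySem.Set.contains ops) then some true
    else if (cs.zip (cs.drop 1)).any
        (fun p => (PySem.Set.contains ops p.1 && PySem.Set.contains ops p.2)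
          || (p.1 == '/' && p.2 == '0')) then some true
    else some false

-- ===== PRECONDITION & SPEC =====
def Spec_finding_error (our_user_input : String) (out : Option Bool) : Prop := out = finding_error_alt our_user_input
instance (our_user_input : String) (out : Option Bool) : Decidable (Spec_finding_error our_user_input out) := by unfold Spec_finding_error; infer_instance

-- ===== CLAIM (what is proved, stated in full; the proofs are below) =====
def Claim_equal_finding_error : Prop := ∀ (our_user_input : String), Dom_finding_error our_user_input → Spec_finding_error our_user_input (finding_error our_user_input)

-- ===== LEMMAS AND PROOFS =====

-- any over zip of a list with its tail = existence of an adjacent index pair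
lemma zip_any_iff (cs : List Char) (p : Char × Char → Bool) :
    (cs.zip (cs.drop 1)).any p = true ↔
      ∃ i, ∃ h : i + 1 < cs.length, p (cs[i], cs[i + 1]) = true := by
  simp only [List.any_eq_true]
  constructor
  · rintro ⟨x, hx, hp⟩
    rcases List.mem_iff_getElem.mp hx with ⟨i, hi, hxi⟩
    have hlen : i + 1 < cs.length := by
      simp [List.length_zip] at hi; omega
    refine ⟨i, hlen, ?_⟩
    have hx' : x = (cs[i], cs[i + 1]) := by
      subst hxi
      simp [List.getElem_zip]
    rwa [hx'] at hp
  · rintro ⟨i, h, hp⟩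
    refine ⟨(cs[i], cs[i + 1]), ?_, hp⟩
    apply List.mem_iff_getElem.mpr
    refine ⟨i, by simp [List.length_zip]; omega, ?_⟩
    simp [List.getElem_zip]

-- A's division_error = existence of an adjacent '/','0' pair
lemma division_error_iff (s : String) :
    division_error s = true ↔
      ∃ i, ∃ h : i + 1 < s.toList.length, s.toList[i] = '/' ∧ s.toList[i + 1] = '0' := by
  unfold division_error
  simp only [List.any_eq_true, PySem.List.mem_pyRange_one, PySem.Str.len_eq,
    Bool.and_eq_true, beq_iff_eq, PySem.Str.pyGet?_eq, PySem.Chars.pyGet?]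
  constructor
  · rintro ⟨x, ⟨hx0, hx1⟩, h1, h2⟩
    obtain ⟨i, rfl⟩ : ∃ n : ℕ, x = (n : ℤ) := ⟨x.toNat, by omega⟩
    have hi : i + 1 < s.toList.length := by omega
    rw [PySem.List.pyGet?_natCast] at h1
    have hc : (i : ℤ) + 1 = ((i + 1 : ℕ) : ℤ) := by push_cast; ring
    rw [hc, PySem.List.pyGet?_natCast] at h2
    rw [List.getElem?_eq_getElem (by omega)] at h1
    rw [List.getElem?_eq_getElem hi] at h2
    exact ⟨i, hi, by simpa using h1, by simpa using h2⟩
  · rintro ⟨i, hi, h1, h2⟩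
    refine ⟨(i : ℤ), ⟨by omega, by omega⟩, ?_, ?_⟩
    · rw [PySem.List.pyGet?_natCast, List.getElem?_eq_getElem (by omega)]; simp [h1]
    · have hc : (i : ℤ) + 1 = ((i + 1 : ℕ) : ℤ) := by push_cast; ring
      rw [hc, PySem.List.pyGet?_natCast, List.getElem?_eq_getElem hi]; simp [h2]

-- a two-character substring is present iff it occurs at an adjacent index pair
lemma isIn_pair_iff (a b : Char) (cs : List Char) :
    PySem.Chars.isIn [a, b] cs = true ↔
      ∃ i, ∃ h : i + 1 < cs.length, cs[i] = a ∧ cs[i + 1] = b := by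
  rw [← PySem.Chars.exists_prefix_drop_iff_isIn]
  constructor
  · rintro ⟨j, t, ht⟩
    have h0 := congrArg (fun l => l[0]?) ht
    have h1 := congrArg (fun l => l[1]?) ht
    simp only [List.getElem?_drop] at h0 h1
    simp only [List.cons_append, List.getElem?_cons_zero, List.getElem?_cons_succ,
      Nat.add_zero] at h0 h1
    have hlen : j + 1 < cs.length := by
      have hl := congrArg List.length ht
      simp [List.length_drop] at hl
      omega
    exact ⟨j, hlen, (List.getElem_eq_iff _).mpr h0.symm, (List.getElem_eq_iff _).mpr h1.symm⟩
  · rintro ⟨i, hi, ha, hb⟩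
    refine ⟨i, cs.drop (i + 2), ?_⟩
    have h1 : cs.drop i = cs[i] :: cs.drop (i + 1) := List.drop_eq_getElem_cons (by omega)
    have h2 : cs.drop (i + 1) = cs[i + 1] :: cs.drop (i + 2) := List.drop_eq_getElem_cons hi
    rw [h1, h2, ha, hb]
    rfl

-- A's set-of-combinations scan = existence of an adjacent operator pair
lemma set_any_iff (cs : List Char) :
    ((PySem.Set.ofList
        (PySem.List.combinations ['+', '-', '*', '/', '+', '-', '*', '/'] 2)).any
          fun error => PySem.Chars.isIn error cs) = true ↔
      ∃ i, ∃ h : i + 1 < cs.length,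
        cs[i] ∈ (['+', '-', '*', '/'] : List Char) ∧
        cs[i + 1] ∈ (['+', '-', '*', '/'] : List Char) := by
  have hset : (PySem.Set.ofList
      (PySem.List.combinations ['+', '-', '*', '/', '+', '-', '*', '/'] 2)) =
      [['+','-'],['+','*'],['+','/'],['+','+'],['-','*'],['-','/'],['-','+'],['-','-'],
       ['*','/'],['*','+'],['*','-'],['*','*'],['/','+'],['/','-'],['/','*'],['/','/']] := by
    decide
  rw [hset]
  rw [List.any_eq_true]
  constructor
  · rintro ⟨e, he, hin⟩
    fin_cases he <;>
      · rw [isIn_pair_iff] at hin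
        obtain ⟨i, h, h1, h2⟩ := hin
        exact ⟨i, h, by simp [h1], by simp [h2]⟩
  · rintro ⟨i, h, h1, h2⟩
    have h1' : cs[i] = '+' ∨ cs[i] = '-' ∨ cs[i] = '*' ∨ cs[i] = '/' := by simpa using h1
    have h2' : cs[i + 1] = '+' ∨ cs[i + 1] = '-' ∨ cs[i + 1] = '*' ∨ cs[i + 1] = '/' := by
      simpa using h2
    refine ⟨[cs[i], cs[i + 1]], ?_, (isIn_pair_iff _ _ _).mpr ⟨i, h, rfl, rfl⟩⟩
    rcases h1' with e1|e1|e1|e1 <;> rcases h2' with e2|e2|e2|e2 <;> rw [e1, e2] <;> decide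

-- positive / negative-one indexing on a nonempty string
lemma pyGet_zero (s : String) : PySem.Str.pyGet? s 0 = s.toList.head? := by
  have h := PySem.List.pyGet?_natCast s.toList 0
  simp only [Nat.cast_zero] at h
  rw [PySem.Str.pyGet?_eq, PySem.Chars.pyGet?, h, List.head?_eq_getElem?]

lemma pyGet_neg_one (s : String) (h : s.toList ≠ []) :
    PySem.Str.pyGet? s (-1) = s.toList.getLast? := by
  have hlen : 1 ≤ s.toList.length := List.length_pos_iff.mpr h
  rw [PySem.Str.pyGet?_eq, PySem.Chars.pyGet?]
  simp only [PySem.List.pyGet?, PySem.List.pyIdx?]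
  rw [if_neg (by omega), if_pos (by omega)]
  simp [List.getLast?_eq_getElem?]

lemma collapse_ifs (c1 c2 : Bool) :
    ((if c1 = true then some true else if c2 = true then some true else some false) : Option Bool)
      = some (c1 || c2) := by
  cases c1 <;> cases c2 <;> rfl

-- ===== VERDICT (by name: the statement is the Claim_ definition above) =====
set_option maxHeartbeats 1000000 in
theorem finding_error_spec : Claim_equal_finding_error := by
  intro s _
  unfold Spec_finding_error finding_error finding_error_alt
  by_cases hcs : s.toList = []
  · simp [hcs]
  · simp only []
    rw [if_neg (show ¬(s.toList.isEmpty = true) by simp [List.isEmpty_iff, hcs]), if_pos hcs]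
    rw [collapse_ifs, collapse_ifs]
    congr 1
    rw [Bool.eq_iff_iff]
    simp only [Bool.or_eq_true]
    rw [division_error_iff, set_any_iff, zip_any_iff, pyGet_zero, pyGet_neg_one s hcs]
    have hops : (PySem.Set.ofList ['+', '-', '*', '/'] : List Char) = ['+', '-', '*', '/'] := by
      decide
    rw [hops]
    have hfun : PySem.Set.contains (['+', '-', '*', '/'] : List Char)
        = List.contains (['+', '-', '*', '/'] : List Char) := funext fun c => by simp
    rw [hfun]
    simp only [Bool.or_eq_true, Bool.and_eq_true, beq_iff_eq, List.contains_iff_mem]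
    have hsplit : (∃ i, ∃ h : i + 1 < s.toList.length,
          (s.toList[i] ∈ (['+', '-', '*', '/'] : List Char) ∧
            s.toList[i + 1] ∈ (['+', '-', '*', '/'] : List Char)) ∨
          (s.toList[i] = '/' ∧ s.toList[i + 1] = '0')) ↔
        ((∃ i, ∃ h : i + 1 < s.toList.length,
            s.toList[i] ∈ (['+', '-', '*', '/'] : List Char) ∧
            s.toList[i + 1] ∈ (['+', '-', '*', '/'] : List Char)) ∨
         (∃ i, ∃ h : i + 1 < s.toList.length,
            s.toList[i] = '/' ∧ s.toList[i + 1] = '0')) := by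
      constructor
      · rintro ⟨i, h, hx | hx⟩
        · exact Or.inl ⟨i, h, hx⟩
        · exact Or.inr ⟨i, h, hx⟩
      · rintro (⟨i, h, hx⟩ | ⟨i, h, hx⟩)
        · exact ⟨i, h, Or.inl hx⟩
        · exact ⟨i, h, Or.inr hx⟩
    rw [hsplit]
    constructor
    · rintro (((h | h) | h) | h)
      · exact Or.inl (Or.inr h)
      · exact Or.inl (Or.inl h)
      · exact Or.inr (Or.inr h)
      · exact Or.inr (Or.inl h)
    · rintro ((h | h) | (h | h))
      · exact Or.inl (Or.inl (Or.inr h))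
      · exact Or.inl (Or.inl (Or.inl h))
      · exact Or.inr h
      · exact Or.inl (Or.inr h)
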